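-- pv_equiv track=rewrite | github.com/JamesJux/Advent-of-Code-2021 | data_2021/__init__.py | count1478
-- ===== SOURCE A (Python) =====
-- def count1478(line):
--     result = []
--     for sequence in line.split(" "):
--         result.append(len(sequence) == 2)  # Test auf 1
--         result.append(len(sequence) == 4)  # Test auf 4
--         result.append(len(sequence) == 3)  # Test auf 7
--         result.append(len(sequence) == 7)  # Test auf 8
--     return result.count(True)
-- ===== SOURCE B (Python) =====
-- def count1478(line):
--     freq = {}
--     for sequence in line.split(" "):
--         freq[len(sequence)] = freq.get(len(sequence), 0) + 1
--     return freq.get(2, 0) + freq.get(3, 0) + freq.get(4, 0) + freq.get(7, 0)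
-- ===== Notes on version B (the rewrite author's own statement) =====
-- stated objective: simpler
-- what changed: Replaces the per-token 4-boolean append list and a final .count(True) scan by a length-frequency table built in one pass, returning the sum of four constant-key lookups.
import Mathlib
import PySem

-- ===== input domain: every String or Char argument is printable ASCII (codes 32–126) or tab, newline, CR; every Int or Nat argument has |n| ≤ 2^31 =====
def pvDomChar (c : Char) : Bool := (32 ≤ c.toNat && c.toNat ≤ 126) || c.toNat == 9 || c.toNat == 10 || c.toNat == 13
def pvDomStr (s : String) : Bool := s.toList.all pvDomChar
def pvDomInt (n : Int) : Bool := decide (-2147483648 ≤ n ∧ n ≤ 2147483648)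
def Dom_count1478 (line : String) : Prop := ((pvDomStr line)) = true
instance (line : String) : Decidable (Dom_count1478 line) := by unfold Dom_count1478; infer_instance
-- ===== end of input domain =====

-- B replaces A's per-token boolean-append list and final .count(True) scan with a
-- length-frequency table built in one pass plus four constant-key lookups (simpler).


-- ===== PORT A =====
def count1478 (line : String) : Int :=
  let result : List Bool := ((PySem.Str.split? line " ").getD []).foldl
    (fun acc s => acc ++ [PySem.Str.len s == 2, PySem.Str.len s == 4,
                          PySem.Str.len s == 3, PySem.Str.len s == 7]) []
  (PySem.List.count result true : Int)

-- ===== PORT B =====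
def count1478_alt (line : String) : Int :=
  let freq : PySem.Dict Int Int := ((PySem.Str.split? line " ").getD []).foldl
    (fun d s => d.insert (PySem.Str.len s) (d.getD (PySem.Str.len s) 0 + 1)) PySem.Dict.empty
  freq.getD 2 0 + freq.getD 3 0 + freq.getD 4 0 + freq.getD 7 0

-- ===== PRECONDITION & SPEC =====
def Spec_count1478 (line : String) (out : Int) : Prop := out = count1478_alt line
instance (line : String) (out : Int) : Decidable (Spec_count1478 line out) := by unfold Spec_count1478; infer_instance

-- ===== CLAIM (what is proved, stated in full; the proofs are below) =====
def Claim_equal_count1478 : Prop := ∀ (line : String), Dom_count1478 line → Spec_count1478 line (count1478 line)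

-- ===== LEMMAS AND PROOFS =====

-- counting True over A's four-booleans-per-token list = the four length-counts
theorem count1478_flat_count (toks : List String) :
    ((toks.flatMap (fun s => [PySem.Str.len s == 2, PySem.Str.len s == 4,
        PySem.Str.len s == 3, PySem.Str.len s == 7])).count true : Int)
    = ((toks.map PySem.Str.len).count 2 : Int) + ((toks.map PySem.Str.len).count 4 : Int)
      + ((toks.map PySem.Str.len).count 3 : Int) + ((toks.map PySem.Str.len).count 7 : Int) := by
  induction toks with
  | nil => simp
  | cons t ts ih =>
    simp only [List.flatMap_cons, List.count_append, List.map_cons, List.count_cons,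
      List.count_nil, beq_iff_eq]
    push_cast [ih]
    split_ifs <;> omega

-- B's frequency table looked up at v is the count of v among the token lengths
theorem count1478_freq_getD (toks : List String) (v : Int) :
    ∀ d : PySem.Dict Int Int,
      (toks.foldl (fun d s => d.insert (PySem.Str.len s) (d.getD (PySem.Str.len s) 0 + 1)) d).getD v 0
      = d.getD v 0 + ((toks.map PySem.Str.len).count v : Int) := by
  induction toks with
  | nil => simp
  | cons t ts ih =>
    intro d
    simp only [List.foldl_cons, ih, List.map_cons, List.count_cons, beq_iff_eq,
      PySem.Dict.getD_insert]
    push_cast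
    split_ifs <;> simp_all <;> omega

-- ===== VERDICT (by name: the statement is the Claim_ definition above) =====
theorem count1478_spec : Claim_equal_count1478 := by
  intro line _
  unfold Spec_count1478
  simp only [count1478, count1478_alt, PySem.List.foldl_append_eq_flatMap, List.nil_append,
    PySem.List.count_eq, count1478_freq_getD, count1478_flat_count, PySem.Dict.getD_empty]
  ring
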